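-- pv_equiv track=rewrite | github.com/MrBrantCode/unitest_baseline | mut_generate/mist_train_cf/cf_95601/solution.py | is_palindrome_vowels
-- ===== SOURCE A (Python) =====
-- def is_palindrome_vowels(string):
--     vowels = ['a', 'e', 'i', 'o', 'u']
--     string = string.lower()
--     string_vowels = sorted(set([char for char in string if char in vowels]))
--
--     if len(string) <= 5:
--         return False
--
--     if string_vowels != vowels:
--         return False
--
--     return string == string[::-1]
-- ===== SOURCE B (Python) =====
-- def is_palindrome_vowels(string):
--     string = string.lower()
--     return len(string) > 5 and all(v in string for v in "aeiou") and string == string[::-1]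
-- ===== Notes on version B (the rewrite author's own statement) =====
-- stated objective: simpler
-- what changed: B replaces A's build-a-set-of-present-vowels, sort it and compare to a list with a direct short-circuiting conjunction: length guard, a per-vowel membership scan over the lowered string, and the palindrome test.
import Mathlib
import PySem

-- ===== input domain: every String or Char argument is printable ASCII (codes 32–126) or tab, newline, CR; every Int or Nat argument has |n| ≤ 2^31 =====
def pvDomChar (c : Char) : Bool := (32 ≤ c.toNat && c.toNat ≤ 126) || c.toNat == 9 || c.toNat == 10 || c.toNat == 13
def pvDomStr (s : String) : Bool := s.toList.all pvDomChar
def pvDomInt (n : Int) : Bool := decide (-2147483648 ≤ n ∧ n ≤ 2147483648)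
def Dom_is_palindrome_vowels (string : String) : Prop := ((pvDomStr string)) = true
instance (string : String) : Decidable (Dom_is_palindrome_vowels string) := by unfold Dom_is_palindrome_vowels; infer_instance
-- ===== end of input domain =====

-- B replaces A's sorted-set-of-present-vowels comparison by a length guard, per-vowel membership scans and the palindrome test (simpler, same results).


-- ===== PORT A =====
def is_palindrome_vowels (string : String) : Bool :=
  let vowels : List Char := ['a', 'e', 'i', 'o', 'u']
  let s : List Char := (PySem.Str.lower string).toList
  let string_vowels : List Char :=
    PySem.List.sorted (PySem.Set.ofList (s.filter (fun c => vowels.contains c))) (fun x => x) false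
  if s.length ≤ 5 then false
  else if string_vowels ≠ vowels then false
  else decide (s = s.reverse)   -- string == string[::-1], via Str.slice?_none_none_neg_one

-- ===== PORT B =====
def is_palindrome_vowels_alt (string : String) : Bool :=
  let s : List Char := (PySem.Str.lower string).toList
  decide (5 < s.length) && (['a', 'e', 'i', 'o', 'u'].all (fun v => s.contains v))
    && decide (s = s.reverse)

-- ===== PRECONDITION & SPEC =====
def Spec_is_palindrome_vowels (string : String) (out : Bool) : Prop := out = is_palindrome_vowels_alt string
instance (string : String) (out : Bool) : Decidable (Spec_is_palindrome_vowels string out) := by unfold Spec_is_palindrome_vowels; infer_instance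

-- ===== CLAIM (what is proved, stated in full; the proofs are below) =====
def Claim_equal_is_palindrome_vowels : Prop := ∀ (string : String), Dom_is_palindrome_vowels string → Spec_is_palindrome_vowels string (is_palindrome_vowels string)

-- ===== LEMMAS AND PROOFS =====

-- sorted(set of vowels occurring in l)) equals the full vowel list iff every vowel occurs in l
theorem sorted_vowelset_eq_iff (l : List Char) :
    PySem.List.sorted (PySem.Set.ofList (l.filter (fun c => (['a','e','i','o','u'] : List Char).contains c))) (fun x => x) false
      = ['a','e','i','o','u'] ↔ ∀ v ∈ (['a','e','i','o','u'] : List Char), v ∈ l := by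
  constructor
  · intro h v hv
    have hperm := PySem.List.sorted_perm
      (xs := PySem.Set.ofList (l.filter (fun c => (['a','e','i','o','u'] : List Char).contains c)))
      (key := fun x => x) (rev := false)
    rw [h] at hperm
    have : v ∈ PySem.Set.ofList (l.filter (fun c => (['a','e','i','o','u'] : List Char).contains c)) :=
      hperm.mem_iff.mp hv
    have := (PySem.Set.mem_ofList _ _).mp this
    exact (List.mem_filter.mp this).1
  · intro h
    apply PySem.List.sorted_eq_of_perm_of_pairwise_lt
    · rw [List.perm_comm, List.perm_ext_iff_of_nodup (PySem.Set.nodup_ofList _) (by decide)]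
      intro a
      rw [PySem.Set.mem_ofList, List.mem_filter]
      constructor
      · intro ⟨_, ha⟩
        simpa using ha
      · intro ha
        exact ⟨h a ha, by simpa using ha⟩
    · decide

-- ===== VERDICT (by name: the statement is the Claim_ definition above) =====
theorem is_palindrome_vowels_spec : Claim_equal_is_palindrome_vowels := by
  intro string _
  unfold Spec_is_palindrome_vowels
  simp only [is_palindrome_vowels, is_palindrome_vowels_alt]
  set s : List Char := (PySem.Str.lower string).toList with hs
  by_cases hlen : s.length <= 5
  · rw [if_pos hlen, decide_eq_false (Nat.not_lt.mpr hlen), Bool.false_and, Bool.false_and]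
  · by_cases hv : PySem.List.sorted (PySem.Set.ofList (s.filter (fun c => (['a','e','i','o','u'] : List Char).contains c))) (fun x => x) false = ['a','e','i','o','u']
    · have hall : ∀ v ∈ (['a','e','i','o','u'] : List Char), v ∈ s := (sorted_vowelset_eq_iff s).mp hv
      have hb : (['a','e','i','o','u'] : List Char).all (fun v => s.contains v) = true := by
        rw [List.all_eq_true]
        intro v hvm
        rw [List.contains_eq_mem, decide_eq_true_eq]
        exact hall v hvm
      rw [if_neg hlen, if_neg (not_not_intro hv), decide_eq_true (Nat.lt_of_not_le hlen), hb,
        Bool.true_and, Bool.true_and]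
    · have hall : ¬ ∀ v ∈ (['a','e','i','o','u'] : List Char), v ∈ s :=
        fun h => hv ((sorted_vowelset_eq_iff s).mpr h)
      have hb : (['a','e','i','o','u'] : List Char).all (fun v => s.contains v) = false := by
        rw [List.all_eq_false]
        simp only [not_forall] at hall
        obtain ⟨v, hvm, hvl⟩ := hall
        exact ⟨v, hvm, by simpa using hvl⟩
      rw [if_neg hlen, if_pos hv, hb, Bool.and_false, Bool.false_and]
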